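-- pv_equiv track=rewrite | github.com/aviolette/aoc2020 | day10/puzzle10.py | descend
-- ===== SOURCE A (Python) =====
-- def descend(i, tree, stats, tup):
--     if not tree[i]:
--         return 1
--
--     acc = 0
--     for child in tree[i]:
--         if child in stats:
--             acc += stats[child]
--         else:
--             stats[child] = descend(child, tree, stats, tup + (child,))
--             acc += stats[child]
--     return acc
-- ===== SOURCE B (Python) =====
-- def descend(i, tree, stats, tup):
--     if not tree[i]:
--         return 1
--     stack = [i]
--     while stack:
--         node = stack[-1]
--         missing = next((c for c in tree[node] if c not in stats), None)
--         if missing is not None: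
--             stack.append(missing)
--             continue
--         val = 1 if not tree[node] else sum(stats[c] for c in tree[node])
--         if node == i:
--             return val
--         stack.pop()
--         stats[node] = val
-- ===== Notes on version B (the rewrite author's own statement) =====
-- stated objective: alternative
-- what changed: A's call recursion is replaced by an iterative post-order traversal with an explicit stack over the same stats memo (same asymptotic cost, no recursion-depth limit).
import Mathlib
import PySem

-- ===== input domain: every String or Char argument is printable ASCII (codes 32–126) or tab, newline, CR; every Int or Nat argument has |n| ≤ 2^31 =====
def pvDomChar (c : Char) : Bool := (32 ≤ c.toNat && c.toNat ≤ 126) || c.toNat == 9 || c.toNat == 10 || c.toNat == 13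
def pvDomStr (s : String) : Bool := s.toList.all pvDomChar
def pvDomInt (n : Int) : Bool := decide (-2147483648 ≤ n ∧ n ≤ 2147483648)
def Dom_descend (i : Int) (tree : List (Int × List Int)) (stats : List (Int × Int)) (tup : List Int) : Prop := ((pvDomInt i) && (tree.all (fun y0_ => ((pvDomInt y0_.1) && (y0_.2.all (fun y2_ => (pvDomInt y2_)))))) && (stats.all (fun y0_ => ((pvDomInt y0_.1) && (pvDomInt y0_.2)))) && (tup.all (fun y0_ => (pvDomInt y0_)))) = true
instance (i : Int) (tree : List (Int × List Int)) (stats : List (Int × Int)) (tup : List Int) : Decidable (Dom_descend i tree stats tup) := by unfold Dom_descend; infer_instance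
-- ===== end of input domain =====

-- B replaces A's call recursion by an iterative explicit-stack post-order loop over the same memo
-- (objective: alternative decomposition, same cost). Both Pythons mutate `stats` in place the same
-- way; the equivalence proved here is about the RETURN value.

-- ===== PORT A =====
-- A is recursive; the port threads the mutated `stats` dict through and uses fuel for totality:
-- under Pre_descend the recursion depth is at most the number of keys, so the fuel never runs out.
mutual
def descendAux (fuel : Nat) (i : Int) (tree : PySem.Dict Int (List Int)) (stats : PySem.Dict Int Int) (tup : List Int) : Option (Int × PySem.Dict Int Int) :=
  match fuel with
  | 0 => none                    -- fuel exhausted (unreachable under Pre_descend)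
  | f + 1 =>
    match tree.get? i with
    | none => none               -- tree[i] raises KeyError
    | some cs =>
      if cs = [] then some (1, stats)        -- if not tree[i]: return 1
      else goA f tree cs 0 stats tup         -- acc = 0; for child in tree[i]: …
termination_by (fuel, 0)
-- the `for child in tree[i]` loop of A, state = (acc, stats)
def goA (f : Nat) (tree : PySem.Dict Int (List Int)) (cs : List Int) (acc : Int) (stats : PySem.Dict Int Int) (tup : List Int) : Option (Int × PySem.Dict Int Int) :=
  match cs with
  | [] => some (acc, stats)
  | c :: rest =>
    match stats.get? c with
    | some v => goA f tree rest (acc + v) stats tup            -- if child in stats: acc += stats[child]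
    | none =>
      match descendAux f c tree stats (tup ++ [c]) with        -- descend(child, tree, stats, tup + (child,))
      | none => none
      | some (v, st1) => goA f tree rest (acc + v) (st1.insert c v) tup  -- stats[child] = …; acc += stats[child]
termination_by (f, cs.length)
end

def descend (i : Int) (tree : List (Int × List Int)) (stats : List (Int × Int)) (tup : List Int) : Int :=
  let td := PySem.Dict.ofList tree
  let sd := PySem.Dict.ofList stats
  match descendAux (td.size + 1) i td sd tup with
  | some (v, _) => v
  | none => 0                    -- A raised or ran out of fuel: unreachable under Pre_descend

-- ===== PORT B =====
-- the `while stack:` loop of B; fuel bounds the number of iterations (3·#keys + 3 suffices under Pre_descend)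
def loopB (fuel : Nat) (i : Int) (tree : PySem.Dict Int (List Int)) (stack : List Int) (stats : PySem.Dict Int Int) : Option Int :=
  match fuel with
  | 0 => none                    -- fuel exhausted (unreachable under Pre_descend)
  | f + 1 =>
    match stack with
    | [] => none                 -- while loop falls through: Python B returns None (unreachable under Pre_descend)
    | node :: rest =>            -- node = stack[-1]
      match tree.get? node with
      | none => none             -- tree[node] raises KeyError
      | some cs =>
        match cs.find? (fun c => !(stats.contains c)) with   -- missing = next((c for c in tree[node] if c not in stats), None)
        | some c => loopB f i tree (c :: node :: rest) stats -- stack.append(missing); continue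
        | none =>
          let val := if cs = [] then 1 else cs.foldl (fun a c => a + stats.getD c 0) 0
          -- getD is exact here: every child is in stats (find? returned none), so Python's stats[c] cannot raise
          if node = i then some val                          -- if node == i: return val
          else loopB f i tree rest (stats.insert node val)   -- stack.pop(); stats[node] = val

def descend_alt (i : Int) (tree : List (Int × List Int)) (stats : List (Int × Int)) (tup : List Int) : Int :=
  let td := PySem.Dict.ofList tree
  let sd := PySem.Dict.ofList stats
  match td.get? i with
  | none => 0                    -- tree[i] raises KeyError: unreachable under Pre_descend
  | some cs =>
    if cs = [] then 1            -- if not tree[i]: return 1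
    else
      match loopB (3 * td.size + 3) i td [i] sd with
      | some v => v
      | none => 0                -- unreachable under Pre_descend

-- ===== PRECONDITION & SPEC =====
-- Graph vocabulary used by Pre_descend: A descends into a child c only when c is not in the initial
-- memo, so the relevant edges are k → c with c ∈ tree[k] and c ∉ stats.  succsD gives the edge
-- targets of one node, stepD adds one layer of targets to a set, iterD iterates that, and
-- boundN td iterations are enough to reach the closure (each useful iteration adds a node, and all
-- added nodes come from the children lists).  reachD is the set of nodes A's recursion can enter.
def succsD (td : PySem.Dict Int (List Int)) (sd : PySem.Dict Int Int) (k : Int) : Finset Int :=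
  ((td.getD k []).filter (fun c => !(sd.contains c))).toFinset
def stepD (td : PySem.Dict Int (List Int)) (sd : PySem.Dict Int Int) (S : Finset Int) : Finset Int :=
  S ∪ S.biUnion (succsD td sd)
def iterD (td : PySem.Dict Int (List Int)) (sd : PySem.Dict Int Int) : Nat → Finset Int → Finset Int
  | 0, S => S
  | n + 1, S => stepD td sd (iterD td sd n S)
def boundN (td : PySem.Dict Int (List Int)) : Nat := (td.items.flatMap (fun p => p.2)).length + 2
def reachD (td : PySem.Dict Int (List Int)) (sd : PySem.Dict Int Int) (i : Int) : Finset Int :=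
  iterD td sd (boundN td) {i}

-- Pre_descend holds exactly when the Python A returns: every node reachable from i (following
-- children not already memoised in stats) is a key of tree (otherwise tree[n] raises KeyError),
-- and no reachable node lies on a cycle of such edges (otherwise A recurses forever).
def Pre_descend (i : Int) (tree : List (Int × List Int)) (stats : List (Int × Int)) (tup : List Int) : Prop :=
  let td := PySem.Dict.ofList tree
  let sd := PySem.Dict.ofList stats
  (∀ n ∈ reachD td sd i, td.contains n = true) ∧
  (∀ n ∈ reachD td sd i, n ∉ iterD td sd (boundN td) (succsD td sd n))
instance (i : Int) (tree : List (Int × List Int)) (stats : List (Int × Int)) (tup : List Int) : Decidable (Pre_descend i tree stats tup) := by unfold Pre_descend; infer_instance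

def pvWitness_descend : Int × (List (Int × List Int)) × (List (Int × Int)) × List Int :=
  (0, [(0, [1, 2]), (1, [2]), (2, [])], [], [])

def Spec_descend (i : Int) (tree : List (Int × List Int)) (stats : List (Int × Int)) (tup : List Int) (out : Int) : Prop := out = descend_alt i tree stats tup
instance (i : Int) (tree : List (Int × List Int)) (stats : List (Int × Int)) (tup : List Int) (out : Int) : Decidable (Spec_descend i tree stats tup out) := by unfold Spec_descend; infer_instance

-- ===== CLAIM (what is proved, stated in full; the proofs are below) =====
def Claim_equal_descend : Prop := ∀ (i : Int) (tree : List (Int × List Int)) (stats : List (Int × Int)) (tup : List Int), Dom_descend i tree stats tup → Pre_descend i tree stats tup → Spec_descend i tree stats tup (descend i tree stats tup)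

-- ===== LEMMAS AND PROOFS =====

-- basic closure lemmas
lemma subset_stepD (td : PySem.Dict Int (List Int)) (sd : PySem.Dict Int Int) (S : Finset Int) :
    S ⊆ stepD td sd S := Finset.subset_union_left

lemma stepD_mono (td : PySem.Dict Int (List Int)) (sd : PySem.Dict Int Int) {S T : Finset Int}
    (h : S ⊆ T) : stepD td sd S ⊆ stepD td sd T :=
  Finset.union_subset_union h (Finset.biUnion_subset_biUnion_of_subset_left _ h)

lemma iterD_mono (td : PySem.Dict Int (List Int)) (sd : PySem.Dict Int Int) (n : Nat)
    {S T : Finset Int} (h : S ⊆ T) : iterD td sd n S ⊆ iterD td sd n T := by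
  induction n with
  | zero => exact h
  | succ n ih => exact stepD_mono td sd ih

lemma subset_iterD (td : PySem.Dict Int (List Int)) (sd : PySem.Dict Int Int) (n : Nat)
    (S : Finset Int) : S ⊆ iterD td sd n S := by
  induction n with
  | zero => exact Finset.Subset.refl S
  | succ n ih => exact ih.trans (subset_stepD td sd _)

lemma iterD_fix (td : PySem.Dict Int (List Int)) (sd : PySem.Dict Int Int) {T : Finset Int}
    (h : stepD td sd T = T) (n : Nat) : iterD td sd n T = T := by
  induction n with
  | zero => rfl
  | succ n ih => show stepD td sd (iterD td sd n T) = T; rw [ih, h]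

lemma mem_stepD_of_succ (td : PySem.Dict Int (List Int)) (sd : PySem.Dict Int Int)
    {T : Finset Int} {a b : Int} (ha : a ∈ T) (hb : b ∈ succsD td sd a) : b ∈ stepD td sd T :=
  Finset.mem_union_right _ (Finset.mem_biUnion.mpr ⟨a, ha, hb⟩)

-- every edge target is listed in some children list of the dict
def childF (td : PySem.Dict Int (List Int)) : Finset Int := (td.items.flatMap (fun p => p.2)).toFinset

lemma succsD_sub_childF (td : PySem.Dict Int (List Int)) (sd : PySem.Dict Int Int) (k : Int) :
    succsD td sd k ⊆ childF td := by
  intro c hc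
  unfold succsD at hc
  rw [List.mem_toFinset, List.mem_filter] at hc
  cases hget : td.get? k with
  | none =>
    rw [PySem.Dict.getD_eq_get?_getD, hget] at hc
    cases hc.1
  | some cs =>
    rw [PySem.Dict.getD_eq_get?_getD, hget] at hc
    have hm : (k, cs) ∈ td.items := PySem.Dict.mem_items_of_get?_eq_some _ hget
    exact List.mem_toFinset.2 (List.mem_flatMap.2 ⟨(k, cs), hm, hc.1⟩)

lemma stepD_sub_union (td : PySem.Dict Int (List Int)) (sd : PySem.Dict Int Int) (T : Finset Int) :
    stepD td sd T ⊆ T ∪ childF td :=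
  Finset.union_subset Finset.subset_union_left
    ((Finset.biUnion_subset.mpr (fun a _ => succsD_sub_childF td sd a)).trans Finset.subset_union_right)

lemma iterD_sub_union (td : PySem.Dict Int (List Int)) (sd : PySem.Dict Int Int) (n : Nat)
    (S : Finset Int) : iterD td sd n S ⊆ S ∪ childF td := by
  induction n with
  | zero => exact Finset.subset_union_left
  | succ n ih =>
    refine (stepD_sub_union td sd _).trans ?_
    exact Finset.union_subset (ih.trans (Finset.Subset.refl _)) Finset.subset_union_right

-- until a fixpoint is hit, every iteration adds at least one element
lemma iterD_grow (td : PySem.Dict Int (List Int)) (sd : PySem.Dict Int Int) (S : Finset Int) :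
    ∀ n, stepD td sd (iterD td sd n S) = iterD td sd n S ∨ n + 1 ≤ (iterD td sd n S).card := by
  intro n
  induction n with
  | zero =>
    by_cases h : stepD td sd S = S
    · exact Or.inl h
    · right
      rcases Finset.eq_empty_or_nonempty S with he | hne
      · exfalso; apply h; subst he; simp [stepD]
      · simpa using Finset.card_pos.mpr hne
  | succ n ih =>
    by_cases hf : stepD td sd (iterD td sd n S) = iterD td sd n S
    · left
      show stepD td sd (stepD td sd (iterD td sd n S)) = stepD td sd (iterD td sd n S)
      rw [hf]
      exact hf
    · right
      have hcard : n + 1 ≤ (iterD td sd n S).card := by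
        rcases ih with h1 | h2
        · exact absurd h1 hf
        · exact h2
      have hss : iterD td sd n S ⊂ stepD td sd (iterD td sd n S) :=
        Finset.ssubset_iff_subset_ne.mpr ⟨subset_stepD td sd _, fun he => hf he.symm⟩
      have := Finset.card_lt_card hss
      show n + 2 ≤ (stepD td sd (iterD td sd n S)).card
      omega

lemma iterD_fix_at (td : PySem.Dict Int (List Int)) (sd : PySem.Dict Int Int) {S : Finset Int}
    {N : Nat} (hN : (S ∪ childF td).card < N) :
    stepD td sd (iterD td sd N S) = iterD td sd N S := by
  rcases iterD_grow td sd S N with h | h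
  · exact h
  · exfalso
    have := Finset.card_le_card (iterD_sub_union td sd N S)
    omega

lemma card_childF_le (td : PySem.Dict Int (List Int)) :
    (childF td).card ≤ (td.items.flatMap (fun p => p.2)).length := List.toFinset_card_le _

lemma fix_singleton (td : PySem.Dict Int (List Int)) (sd : PySem.Dict Int Int) (k : Int) :
    stepD td sd (iterD td sd (boundN td) {k}) = iterD td sd (boundN td) {k} := by
  apply iterD_fix_at
  have h1 := Finset.card_union_le ({k} : Finset Int) (childF td)
  have h2 := card_childF_le td
  have : (({k} : Finset Int)).card = 1 := Finset.card_singleton k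
  unfold boundN
  omega

lemma fix_succs (td : PySem.Dict Int (List Int)) (sd : PySem.Dict Int Int) (k : Int) :
    stepD td sd (iterD td sd (boundN td) (succsD td sd k)) = iterD td sd (boundN td) (succsD td sd k) := by
  apply iterD_fix_at
  have h1 : succsD td sd k ∪ childF td = childF td :=
    Finset.union_eq_right.mpr (succsD_sub_childF td sd k)
  rw [h1]
  have h2 := card_childF_le td
  unfold boundN
  omega

-- membership in a closed set is preserved along edges
lemma closed_succ (td : PySem.Dict Int (List Int)) (sd : PySem.Dict Int Int) {T : Finset Int}
    (hfix : stepD td sd T = T) {k c : Int} (hk : k ∈ T) (hc : c ∈ succsD td sd k) : c ∈ T :=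
  hfix ▸ mem_stepD_of_succ td sd hk hc

lemma mem_reachD_succ (td : PySem.Dict Int (List Int)) (sd : PySem.Dict Int Int) {i k c : Int}
    (hk : k ∈ reachD td sd i) (hc : c ∈ succsD td sd k) : c ∈ reachD td sd i :=
  closed_succ td sd (fix_singleton td sd i) hk hc

lemma mem_reachD_self (td : PySem.Dict Int (List Int)) (sd : PySem.Dict Int Int) (i : Int) :
    i ∈ reachD td sd i :=
  subset_iterD td sd (boundN td) {i} (Finset.mem_singleton_self i)

lemma succs_of_child (td : PySem.Dict Int (List Int)) (sd : PySem.Dict Int Int) {k c : Int}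
    {cs : List Int} (hget : td.get? k = some cs) (hc : c ∈ cs) (hsd : sd.contains c = false) :
    c ∈ succsD td sd k := by
  unfold succsD
  rw [List.mem_toFinset, List.mem_filter, PySem.Dict.getD_eq_get?_getD, hget]
  exact ⟨hc, by simp [hsd]⟩

-- the termination measure: size of the closure from a single node
def mN (td : PySem.Dict Int (List Int)) (sd : PySem.Dict Int Int) (k : Int) : Nat :=
  (iterD td sd (boundN td) {k}).card

lemma mN_lt (td : PySem.Dict Int (List Int)) (sd : PySem.Dict Int Int) {k c : Int}
    (hc : c ∈ succsD td sd k) (hnc : k ∉ iterD td sd (boundN td) (succsD td sd k)) :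
    mN td sd c < mN td sd k := by
  have hkk : k ∈ iterD td sd (boundN td) {k} := subset_iterD td sd _ _ (Finset.mem_singleton_self k)
  have hck : c ∈ iterD td sd (boundN td) {k} := closed_succ td sd (fix_singleton td sd k) hkk hc
  have hsub : iterD td sd (boundN td) {c} ⊆ iterD td sd (boundN td) {k} := by
    have h1 : ({c} : Finset Int) ⊆ iterD td sd (boundN td) {k} := Finset.singleton_subset_iff.mpr hck
    have h2 := iterD_mono td sd (boundN td) h1
    rwa [iterD_fix td sd (fix_singleton td sd k)] at h2
  have hknotc : k ∉ iterD td sd (boundN td) {c} := by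
    intro hmem
    exact hnc (iterD_mono td sd (boundN td) (Finset.singleton_subset_iff.mpr hc) hmem)
  exact Finset.card_lt_card (Finset.ssubset_iff_subset_ne.mpr
    ⟨hsub, fun he => hknotc (he ▸ hkk)⟩)

-- the pure value both programs compute for a node, relative to the INITIAL memo sd
def pureV (td : PySem.Dict Int (List Int)) (sd : PySem.Dict Int Int) (k : Int) : Int :=
  match td.get? k with
  | none => 0
  | some cs =>
    if cs = [] then 1
    else (cs.attach.map (fun c =>
        match sd.get? c.1 with
        | some w => w
        | none => if h : mN td sd c.1 < mN td sd k then pureV td sd c.1 else 0)).sum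
termination_by mN td sd k

def contribV (td : PySem.Dict Int (List Int)) (sd : PySem.Dict Int Int) (c : Int) : Int :=
  match sd.get? c with
  | some w => w
  | none => pureV td sd c

def ExtD (s1 s2 : PySem.Dict Int Int) : Prop := ∀ k v, s1.get? k = some v → s2.get? k = some v

-- the memo invariant: st extends sd and every extra entry holds the pure value
def GoodS (td : PySem.Dict Int (List Int)) (sd st : PySem.Dict Int Int) : Prop :=
  ExtD sd st ∧ ∀ k v, st.get? k = some v → sd.get? k = some v ∨ (sd.get? k = none ∧ v = pureV td sd k)

lemma pure_nil (td : PySem.Dict Int (List Int)) (sd : PySem.Dict Int Int) {k : Int}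
    (h : td.get? k = some []) : pureV td sd k = 1 := by
  rw [pureV, h]
  simp

lemma pure_cons (td : PySem.Dict Int (List Int)) (sd : PySem.Dict Int Int) {k : Int} {cs : List Int}
    (h : td.get? k = some cs) (hne : cs ≠ [])
    (hedge : ∀ c ∈ cs, sd.contains c = true ∨ mN td sd c < mN td sd k) :
    pureV td sd k = (cs.map (contribV td sd)).sum := by
  rw [pureV, h]
  dsimp only
  rw [if_neg hne]
  have hm : cs.attach.map (fun c =>
      match sd.get? c.1 with
      | some w => w
      | none => if _ : mN td sd c.1 < mN td sd k then pureV td sd c.1 else 0) =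
      cs.attach.map (fun c => contribV td sd c.1) := by
    apply List.map_congr_left
    intro x _
    cases hsd : sd.get? x.1 with
    | some w => simp [contribV, hsd]
    | none =>
      have hx : x.1 ∈ cs := x.2
      have h2 : mN td sd x.1 < mN td sd k := by
        rcases hedge x.1 hx with h1 | h2
        · exfalso
          have := (PySem.Dict.get?_eq_none_iff_contains _ _).mp hsd
          simp [this] at h1
        · exact h2
      simp [contribV, hsd, dif_pos h2]
  rw [hm]
  simp

lemma mainA (td : PySem.Dict Int (List Int)) (sd : PySem.Dict Int Int) (i : Int)
    (hR1 : ∀ n ∈ reachD td sd i, td.contains n = true)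
    (hR2 : ∀ n ∈ reachD td sd i, n ∉ iterD td sd (boundN td) (succsD td sd n)) :
    ∀ (fA : Nat) (k : Int) (st : PySem.Dict Int Int) (tup : List Int) (cs : List Int),
      GoodS td sd st → k ∈ reachD td sd i → td.get? k = some cs → mN td sd k < fA →
      ∃ st', descendAux fA k td st tup = some (pureV td sd k, st') ∧ GoodS td sd st' ∧ ExtD st st' := by
  intro fA
  induction fA with
  | zero => intro k st tup cs _ _ _ h; omega
  | succ f ih =>
    intro k st tup cs hg hkR hget hm
    have hedge : ∀ c ∈ cs, sd.contains c = true ∨ (c ∈ reachD td sd i ∧ mN td sd c < mN td sd k) := by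
      intro c hc
      by_cases hsd : sd.contains c = true
      · exact Or.inl hsd
      · have hsd' : sd.contains c = false := by
          cases hb : sd.contains c
          · rfl
          · exact absurd hb hsd
        have hsucc : c ∈ succsD td sd k := succs_of_child td sd hget hc hsd'
        exact Or.inr ⟨mem_reachD_succ td sd hkR hsucc, mN_lt td sd hsucc (hR2 k hkR)⟩
    by_cases hcs : cs = []
    · subst hcs
      refine ⟨st, ?_, hg, fun _ _ h => h⟩
      simp [descendAux, hget, pure_nil td sd hget]
    · have goLem : ∀ (cs' : List Int),
          (∀ c ∈ cs', sd.contains c = true ∨ (c ∈ reachD td sd i ∧ mN td sd c < f)) →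
          ∀ (acc : Int) (st : PySem.Dict Int Int) (tup : List Int), GoodS td sd st →
          ∃ st', goA f td cs' acc st tup = some (acc + (cs'.map (contribV td sd)).sum, st') ∧
            GoodS td sd st' ∧ ExtD st st' := by
        intro cs'
        induction cs' with
        | nil => intro _ acc st tup hg; exact ⟨st, by simp [goA], hg, fun _ _ h => h⟩
        | cons c rest ihc =>
          intro hed acc st tup hg
          have hedc := hed c (by simp)
          cases hstc : st.get? c with
          | some v =>
            have hv : v = contribV td sd c := by
              rcases hg.2 c v hstc with h1 | h2
              · simp [contribV, h1]
              · simp [contribV, h2.1, h2.2]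
            obtain ⟨st', hgo, hg', hext⟩ := ihc (fun x hx => hed x (by simp [hx])) (acc + v) st tup hg
            refine ⟨st', ?_, hg', hext⟩
            rw [show goA f td (c :: rest) acc st tup = goA f td rest (acc + v) st tup by
              simp [goA, hstc], hgo, hv]
            congr 1
            simp
            ring
          | none =>
            have hsdc : sd.get? c = none := by
              cases hsd : sd.get? c with
              | none => rfl
              | some w =>
                have := hg.1 c w hsd
                rw [hstc] at this
                cases this
            have hcont : c ∈ reachD td sd i ∧ mN td sd c < f := by
              rcases hedc with h1 | h2
              · exfalso
                have := (PySem.Dict.get?_eq_none_iff_contains _ _).mp hsdc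
                simp [this] at h1
              · exact h2
            obtain ⟨cs2, hcs2⟩ : ∃ cs2, td.get? c = some cs2 := by
              have h1 := hR1 c hcont.1
              rw [PySem.Dict.contains_eq_isSome_get?] at h1
              exact Option.isSome_iff_exists.mp h1
            obtain ⟨st1, hrec, hg1, hext1⟩ := ih c st (tup ++ [c]) cs2 hg hcont.1 hcs2 hcont.2
            have hg2 : GoodS td sd (st1.insert c (pureV td sd c)) := by
              constructor
              · intro x v hx
                have hxc : x ≠ c := by
                  intro he; subst he; rw [hsdc] at hx; cases hx
                rw [PySem.Dict.get?_insert]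
                simp [hxc]
                exact hg1.1 x v hx
              · intro x v hx
                rw [PySem.Dict.get?_insert] at hx
                by_cases hxc : x = c
                · subst hxc
                  simp at hx
                  exact Or.inr ⟨hsdc, hx.symm⟩
                · simp [hxc] at hx
                  exact hg1.2 x v hx
            have hext2 : ExtD st (st1.insert c (pureV td sd c)) := by
              intro x v hx
              have hxc : x ≠ c := by
                intro he; subst he; rw [hstc] at hx; cases hx
              rw [PySem.Dict.get?_insert]
              simp [hxc]
              exact hext1 x v hx
            obtain ⟨st', hgo, hg', hext'⟩ :=
              ihc (fun x hx => hed x (by simp [hx])) (acc + pureV td sd c) (st1.insert c (pureV td sd c)) tup hg2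
            refine ⟨st', ?_, hg', fun x v hx => hext' x v (hext2 x v hx)⟩
            rw [show goA f td (c :: rest) acc st tup =
                goA f td rest (acc + pureV td sd c) (st1.insert c (pureV td sd c)) tup by
              simp [goA, hstc, hrec], hgo]
            congr 1
            simp [contribV, hsdc]
            ring
      have hedf : ∀ c ∈ cs, sd.contains c = true ∨ (c ∈ reachD td sd i ∧ mN td sd c < f) := by
        intro c hc
        rcases hedge c hc with h1 | h2
        · exact Or.inl h1
        · exact Or.inr ⟨h2.1, by omega⟩
      obtain ⟨st', hgo, hg', hext'⟩ := goLem cs hedf 0 st tup hg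
      refine ⟨st', ?_, hg', hext'⟩
      rw [show descendAux (f + 1) k td st tup = goA f td cs 0 st tup by
        simp [descendAux, hget, hcs], hgo,
        pure_cons td sd hget hcs (fun c hc => (hedge c hc).imp id And.right)]
      simp

def Mst (td : PySem.Dict Int (List Int)) (st : PySem.Dict Int Int) : Nat :=
  (td.keys.filter (fun k => (st.get? k).isNone)).length

-- one entry of the memo flips from missing to present: the count of missing keys drops by one
lemma filter_flip (p q : Int → Bool) (n : Int) :
    ∀ (l : List Int), l.Nodup → n ∈ l → p n = true → q n = false →
    (∀ x, x ≠ n → q x = p x) → (l.filter q).length + 1 = (l.filter p).length := by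
  intro l
  induction l with
  | nil => intro _ h; cases h
  | cons a l ihl =>
    intro hnd hn hpn hqn hag
    rcases List.mem_cons.mp hn with ha | ha
    · subst ha
      have hfl : l.filter q = l.filter p := by
        apply List.filter_congr
        intro x hx
        exact hag x (fun he => (List.nodup_cons.mp hnd).1 (he ▸ hx))
      simp [hpn, hqn, hfl]
    · have hadiff : a ≠ n := fun he => (List.nodup_cons.mp hnd).1 (he ▸ ha)
      have := ihl (List.nodup_cons.mp hnd).2 ha hpn hqn hag
      have hqa : q a = p a := hag a hadiff
      simp only [List.filter_cons, hqa]
      cases hpa : p a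
      · simp only [Bool.false_eq_true, if_false]
        omega
      · simp
        omega

-- all children already memoised: the accumulation loop of A just sums the memo
lemma cached_sum (td : PySem.Dict Int (List Int)) (sd : PySem.Dict Int Int)
    (st : PySem.Dict Int Int) (hg : GoodS td sd st) :
    ∀ (cs : List Int) (acc : Int), (∀ c ∈ cs, st.contains c = true) →
    cs.foldl (fun a c => a + st.getD c 0) acc = acc + (cs.map (contribV td sd)).sum := by
  intro cs
  induction cs with
  | nil => intro acc _; simp
  | cons c rest ihc =>
    intro acc h
    obtain ⟨v, hv⟩ : ∃ v, st.get? c = some v := by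
      have h1 := h c (by simp)
      rw [PySem.Dict.contains_eq_isSome_get?] at h1
      exact Option.isSome_iff_exists.mp h1
    have hcv : v = contribV td sd c := by
      rcases hg.2 c v hv with h1 | h2
      · simp [contribV, h1]
      · simp [contribV, h2.1, h2.2]
    have hgd : st.getD c 0 = v := by simp [PySem.Dict.getD_eq_get?_getD, hv]
    rw [List.foldl_cons, hgd, ihc (acc + v) (fun x hx => h x (by simp [hx]))]
    simp [hcv]
    ring

-- a Pairwise list whose relation is irreflexive on its members has no duplicates
lemma nodup_of_pairwise {r : Int → Int → Prop} :
    ∀ (l : List Int), List.Pairwise r l → (∀ x ∈ l, ¬ r x x) → l.Nodup := by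
  intro l hp hirr
  induction l with
  | nil => exact List.nodup_nil
  | cons a t iht =>
    rcases List.pairwise_cons.mp hp with ⟨h1, h2⟩
    refine List.nodup_cons.mpr ⟨?_, iht h2 (fun x hx => hirr x (by simp [hx]))⟩
    intro hmem
    exact hirr a (by simp) (h1 a hmem)

lemma mainB (td : PySem.Dict Int (List Int)) (sd : PySem.Dict Int Int) (i : Int)
    (hnd : td.keys.Nodup)
    (hR1 : ∀ n ∈ reachD td sd i, td.contains n = true)
    (hR2 : ∀ n ∈ reachD td sd i, n ∉ iterD td sd (boundN td) (succsD td sd n)) :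
    ∀ (fB : Nat) (stack : List Int) (st : PySem.Dict Int Int) (l : List Int),
      GoodS td sd st → stack = l ++ [i] →
      (∀ x ∈ stack, x ∈ reachD td sd i) →
      List.Pairwise (fun a b => a ∈ iterD td sd (boundN td) (succsD td sd b)) stack →
      (∀ n ∈ l, st.get? n = none) →
      3 * Mst td st + 2 ≤ fB + stack.length →
      loopB fB i td stack st = some (pureV td sd i) := by
  intro fB
  induction fB with
  | zero =>
    intro stack st l hg hsk hsR hpw hl hfuel
    exfalso
    have hndstack : stack.Nodup :=
      nodup_of_pairwise stack hpw (fun x hx => hR2 x (hsR x hx))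
    subst hsk
    have hndl : l.Nodup := (List.nodup_append.mp hndstack).1
    have hsub : l ⊆ td.keys.filter (fun k => (st.get? k).isNone) := by
      intro n hn
      have hnR : n ∈ reachD td sd i := hsR n (by simp [hn])
      refine List.mem_filter.2 ⟨(PySem.Dict.contains_iff_mem_keys _ _).mp (hR1 n hnR), ?_⟩
      simp [hl n hn]
    have hlen : l.length ≤ Mst td st := by
      have h1 : l.toFinset.card = l.length := List.toFinset_card_of_nodup hndl
      have h2 : l.toFinset ⊆ (td.keys.filter (fun k => (st.get? k).isNone)).toFinset := by
        intro x hx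
        exact List.mem_toFinset.2 (hsub (List.mem_toFinset.1 hx))
      have h3 := Finset.card_le_card h2
      have h4 := List.toFinset_card_le (td.keys.filter (fun k => (st.get? k).isNone))
      unfold Mst
      omega
    simp at hfuel
    omega
  | succ f ih =>
    intro stack st l hg hsk hsR hpw hl hfuel
    obtain ⟨node, rest, hstk, hshape⟩ : ∃ node rest, stack = node :: rest ∧
        ((l = [] ∧ node = i ∧ rest = []) ∨ (∃ l', l = node :: l' ∧ rest = l' ++ [i])) := by
      cases l with
      | nil => exact ⟨i, [], by simp [hsk], Or.inl ⟨rfl, rfl, by simp⟩⟩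
      | cons n l' => exact ⟨n, l' ++ [i], by simp [hsk], Or.inr ⟨l', rfl, rfl⟩⟩
    have hnodeR : node ∈ reachD td sd i := hsR node (by simp [hstk])
    have hcontnode : td.contains node = true := hR1 node hnodeR
    obtain ⟨cs, hcs⟩ : ∃ cs, td.get? node = some cs := by
      rw [PySem.Dict.contains_eq_isSome_get?] at hcontnode
      exact Option.isSome_iff_exists.mp hcontnode
    cases hfind : cs.find? (fun c => !(st.contains c)) with
    | some c =>
      have hcmem : c ∈ cs := List.mem_of_find?_eq_some hfind
      have hcc : st.contains c = false := by
        have := List.find?_some hfind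
        simp at this
        exact this
      have hstc : st.get? c = none := (PySem.Dict.get?_eq_none_iff_contains _ _).mpr hcc
      have hsdc : sd.get? c = none := by
        cases hsd : sd.get? c with
        | none => rfl
        | some w =>
          have := hg.1 c w hsd
          rw [hstc] at this
          cases this
      have hsdcont : sd.contains c = false := (PySem.Dict.get?_eq_none_iff_contains _ _).mp hsdc
      have hcsucc : c ∈ succsD td sd node := succs_of_child td sd hcs hcmem hsdcont
      have hcR : c ∈ reachD td sd i := mem_reachD_succ td sd hnodeR hcsucc
      have hstep : loopB (f + 1) i td stack st = loopB f i td (c :: stack) st := by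
        rw [hstk]
        simp [loopB, hcs, hfind]
      rw [hstep]
      apply ih (c :: stack) st (c :: l) hg (by simp [hsk])
      · intro x hx
        rcases List.mem_cons.mp hx with h1 | h2
        · exact h1 ▸ hcR
        · exact hsR x h2
      · refine List.pairwise_cons.2 ⟨?_, hpw⟩
        intro x hx
        rw [hstk] at hx
        rcases List.mem_cons.mp hx with hx1 | hx2
        · subst hx1
          exact subset_iterD td sd (boundN td) (succsD td sd x) hcsucc
        · have hnx : node ∈ iterD td sd (boundN td) (succsD td sd x) :=
            (List.pairwise_cons.mp (hstk ▸ hpw)).1 x hx2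
          have := mem_stepD_of_succ td sd hnx hcsucc
          rwa [fix_succs td sd x] at this
      · intro n hn
        rcases List.mem_cons.mp hn with h1 | h2
        · exact h1 ▸ hstc
        · exact hl n h2
      · simp
        omega
    | none =>
      have hall : ∀ c ∈ cs, st.contains c = true := by
        intro c hc
        have := List.find?_eq_none.mp hfind c hc
        simp at this
        exact this
      have hedge : ∀ c ∈ cs, sd.contains c = true ∨ mN td sd c < mN td sd node := by
        intro c hc
        by_cases hsd : sd.contains c = true
        · exact Or.inl hsd
        · have hsd' : sd.contains c = false := by
            cases hb : sd.contains c
            · rfl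
            · exact absurd hb hsd
          exact Or.inr (mN_lt td sd (succs_of_child td sd hcs hc hsd') (hR2 node hnodeR))
      have hval : (if cs = [] then (1 : Int) else cs.foldl (fun a c => a + st.getD c 0) 0) =
          pureV td sd node := by
        by_cases hcse : cs = []
        · subst hcse
          simp [pure_nil td sd hcs]
        · rw [if_neg hcse, cached_sum td sd st hg cs 0 hall,
            pure_cons td sd hcs hcse hedge]
          simp
      by_cases hni : node = i
      · subst hni
        rw [hstk]
        simp [loopB, hcs, hfind, hval]
      · obtain ⟨l', hl', hrest⟩ : ∃ l', l = node :: l' ∧ rest = l' ++ [i] := by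
          rcases hshape with ⟨_, hni2, _⟩ | h2
          · exact absurd hni2 hni
          · exact h2
        have hstnode : st.get? node = none := hl node (by simp [hl'])
        have hsdnode : sd.get? node = none := by
          cases hsd : sd.get? node with
          | none => rfl
          | some w =>
            have := hg.1 node w hsd
            rw [hstnode] at this
            cases this
        have hndstack : stack.Nodup :=
          nodup_of_pairwise stack hpw (fun x hx => hR2 x (hsR x hx))
        set st2 := st.insert node (pureV td sd node) with hst2
        have hg2 : GoodS td sd st2 := by
          constructor
          · intro x v hx
            have hxc : x ≠ node := by
              intro he; subst he; rw [hsdnode] at hx; cases hx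
            rw [hst2, PySem.Dict.get?_insert]
            simp [hxc]
            exact hg.1 x v hx
          · intro x v hx
            rw [hst2, PySem.Dict.get?_insert] at hx
            by_cases hxc : x = node
            · subst hxc
              simp at hx
              exact Or.inr ⟨hsdnode, hx.symm⟩
            · simp [hxc] at hx
              exact hg.2 x v hx
        have hstep : loopB (f + 1) i td stack st = loopB f i td rest st2 := by
          rw [hstk]
          simp [loopB, hcs, hfind, hni, hval, hst2]
        rw [hstep]
        have hmst : Mst td st2 + 1 = Mst td st := by
          apply filter_flip (fun k => (st.get? k).isNone) (fun k => (st2.get? k).isNone) node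
            td.keys hnd ((PySem.Dict.contains_iff_mem_keys _ _).mp hcontnode)
          · simp [hstnode]
          · simp [hst2, PySem.Dict.get?_insert_self]
          · intro x hx
            simp [hst2, PySem.Dict.get?_insert, hx]
        apply ih rest st2 l' hg2 hrest
          (fun x hx => hsR x (by rw [hstk]; simp [hx]))
          ((List.pairwise_cons.mp (hstk ▸ hpw)).2)
        · intro n hn
          have hnne : n ≠ node := by
            intro he
            subst he
            have := (List.nodup_cons.mp (hstk ▸ hndstack)).1
            apply this
            rw [hrest]
            simp [hn]
          rw [hst2, PySem.Dict.get?_insert]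
          simp [hnne]
          exact hl n (by simp [hl', hn])
        · rw [hstk] at hfuel
          simp at hfuel
          omega

lemma mN_le_size (td : PySem.Dict Int (List Int)) (sd : PySem.Dict Int Int) (i : Int)
    (hR1 : ∀ n ∈ reachD td sd i, td.contains n = true) : mN td sd i ≤ td.size := by
  have hsub : iterD td sd (boundN td) {i} ⊆ td.keys.toFinset := by
    intro n hn
    exact List.mem_toFinset.2 ((PySem.Dict.contains_iff_mem_keys _ _).mp (hR1 n hn))
  have h1 := Finset.card_le_card hsub
  have h2 := List.toFinset_card_le td.keys
  have h3 : td.keys.length = td.size := by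
    simp [PySem.Dict.keys, PySem.Dict.size]
  unfold mN
  omega

lemma Mst_le_size (td : PySem.Dict Int (List Int)) (st : PySem.Dict Int Int) :
    Mst td st ≤ td.size := by
  have h1 : Mst td st ≤ td.keys.length := List.length_filter_le _ _
  have h2 : td.keys.length = td.size := by
    simp [PySem.Dict.keys, PySem.Dict.size]
  omega

-- ===== VERDICT (by name: the statement is the Claim_ definition above) =====
theorem descend_spec : Claim_equal_descend := by
  intro i tree stats tup _ hpre
  unfold Spec_descend descend descend_alt
  dsimp only
  obtain ⟨hR1, hR2⟩ := hpre
  set td := PySem.Dict.ofList tree with htd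
  set sd := PySem.Dict.ofList stats with hsd
  have hnd : td.keys.Nodup := PySem.Dict.nodup_keys_ofList _
  have hiR : i ∈ reachD td sd i := mem_reachD_self td sd i
  obtain ⟨cs0, hcs0⟩ : ∃ cs0, td.get? i = some cs0 := by
    have h1 := hR1 i hiR
    rw [PySem.Dict.contains_eq_isSome_get?] at h1
    exact Option.isSome_iff_exists.mp h1
  have hGd : GoodS td sd sd := ⟨fun _ _ h => h, fun _ _ h => Or.inl h⟩
  obtain ⟨st', hA, _, _⟩ := mainA td sd i hR1 hR2 (td.size + 1) i sd tup cs0 hGd hiR hcs0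
    (by have := mN_le_size td sd i hR1; omega)
  have hB := mainB td sd i hnd hR1 hR2 (3 * td.size + 3) [i] sd [] hGd rfl
    (by intro x hx; simp at hx; exact hx ▸ hiR)
    (List.pairwise_singleton _ _) (by simp)
    (by have := Mst_le_size td sd; simp; omega)
  rw [hA, hB, hcs0]
  by_cases hcse : cs0 = []
  · subst hcse
    simp [pure_nil td sd hcs0]
  · simp [hcse]
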